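-- pv_equiv track=rewrite | github.com/gaalcaras/mailingListAnalysis | tools.py | int_list
-- ===== SOURCE A (Python) =====
-- def int_list(sequence):
--     """Given a sorted list A of elements, return a sorted list B of integers
--     starting at 0, where each unique value in A has one and only one equivalent
--     in B"""
--
--     result = list(range(0, len(sequence)))
--
--     for i in range(1, len(sequence)):
--         if sequence[i] == sequence[i-1]:
--             result[i] = result[i-1]
--         else:
--             result[i] = result[i-1]+1
--
--     return result
-- ===== SOURCE B (Python) =====
-- def int_list(sequence):
--     """Dense ranks of a sorted list: change-flags pass + running prefix sum."""
--     if not sequence: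
--         return []
--     flags = [1 if b != a else 0 for a, b in zip(sequence, sequence[1:])]
--     out = [0]
--     total = 0
--     for f in flags:
--         total += f
--         out.append(total)
--     return out
-- ===== Notes on version B (the rewrite author's own statement) =====
-- stated objective: alternative
-- what changed: B builds a 0/1 change-flag list from adjacent pairs and returns its running prefix sum, instead of A's in-place propagation result[i]=result[i-1](+1) over a preallocated index array.
import Mathlib
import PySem

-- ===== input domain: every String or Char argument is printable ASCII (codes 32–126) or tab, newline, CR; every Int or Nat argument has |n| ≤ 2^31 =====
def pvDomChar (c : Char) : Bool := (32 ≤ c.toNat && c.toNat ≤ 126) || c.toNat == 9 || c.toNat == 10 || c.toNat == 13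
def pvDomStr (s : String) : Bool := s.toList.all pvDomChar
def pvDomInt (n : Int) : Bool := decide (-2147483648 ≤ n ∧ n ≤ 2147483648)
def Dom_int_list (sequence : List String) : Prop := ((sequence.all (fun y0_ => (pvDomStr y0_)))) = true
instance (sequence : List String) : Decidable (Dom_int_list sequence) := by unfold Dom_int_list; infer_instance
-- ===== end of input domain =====

-- B replaces A's in-place result[i]=result[i-1](+1) propagation over a preallocated
-- index array by a change-flag list plus a running prefix sum (objective: alternative).


-- ===== PORT A =====
-- loop body of A ('if sequence[i] == sequence[i-1]: result[i] = result[i-1] else: result[i] = result[i-1]+1');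
-- indices produced by range(1, len) are always in range, so pyGetD/pySetD are exact here
def stepA (seq : List String) (result : List Int) (i : Int) : List Int :=
  if PySem.List.pyGetD seq i "" = PySem.List.pyGetD seq (i - 1) "" then
    PySem.List.pySetD result i (PySem.List.pyGetD result (i - 1) 0)
  else
    PySem.List.pySetD result i (PySem.List.pyGetD result (i - 1) 0 + 1)

def int_list (sequence : List String) : List Int :=
  -- result = list(range(0, len(sequence)))
  let result : List Int := PySem.List.pyRange 0 (sequence.length : Int) 1
  -- for i in range(1, len(sequence)): …
  (PySem.List.pyRange 1 (sequence.length : Int) 1).foldl (stepA sequence) result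

-- ===== PORT B =====
def int_list_alt (sequence : List String) : List Int :=
  match sequence with
  | [] => []
  | x :: xs =>
    -- flags = [1 if b != a else 0 for a, b in zip(sequence, sequence[1:])]
    let flags : List Int := ((x :: xs).zip xs).map (fun p => if p.2 ≠ p.1 then 1 else 0)
    -- out = [0]; total = 0; for f in flags: total += f; out.append(total)
    (flags.foldl (fun (acc : List Int × Int) f => (acc.1 ++ [acc.2 + f], acc.2 + f)) ([0], 0)).1

-- ===== PRECONDITION & SPEC =====
def Spec_int_list (sequence : List String) (out : List Int) : Prop := out = int_list_alt sequence
instance (sequence : List String) (out : List Int) : Decidable (Spec_int_list sequence out) := by unfold Spec_int_list; infer_instance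

-- ===== CLAIM (what is proved, stated in full; the proofs are below) =====
def Claim_equal_int_list : Prop := ∀ (sequence : List String), Dom_int_list sequence → Spec_int_list sequence (int_list sequence)

-- ===== LEMMAS AND PROOFS =====

-- reference: dense ranks of ts, given previous element prev with rank r
def ranksGo (prev : String) (r : Int) : List String → List Int
  | [] => []
  | t :: ts => (if t = prev then r else r + 1) :: ranksGo t (if t = prev then r else r + 1) ts

-- running prefix sums starting from t
def scanT (t : Int) : List Int → List Int
  | [] => []
  | f :: fs => (t + f) :: scanT (t + f) fs

-- set of a list at the length of a prefix
theorem set_append_length {α : Type} (l : List α) (a : α) (rest : List α) (v : α) :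
    (l ++ a :: rest).set l.length v = l ++ v :: rest := by
  induction l with
  | nil => rfl
  | cons h tl ih => simp [ih]

-- xs[len(l)] when xs = l ++ a :: rest
theorem pyGetD_append_length {α : Type} (l : List α) (a : α) (rest : List α) (d : α) :
    PySem.List.pyGetD (l ++ a :: rest) (l.length : Int) d = a := by
  simp

-- A's loop invariant: done'++[r] are the already-computed ranks, the untouched
-- suffix of result still holds its initial range values
theorem loopA (ts : List String) : ∀ (front' : List String) (prev : String)
    (done' : List Int) (r : Int), done'.length = front'.length →
    (PySem.List.pyRange ((front'.length : Int) + 1) ((front'.length : Int) + 1 + ts.length) 1).foldl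
      (stepA ((front' ++ [prev]) ++ ts))
      ((done' ++ [r]) ++ PySem.List.pyRange ((front'.length : Int) + 1) ((front'.length : Int) + 1 + ts.length) 1)
    = (done' ++ [r]) ++ ranksGo prev r ts := by
  induction ts with
  | nil =>
    intro front' prev done' r hlen
    simp [PySem.List.pyRange_one_eq_nil, ranksGo]
  | cons t ts' ih =>
    intro front' prev done' r hlen
    have hlt : (front'.length : Int) + 1 < (front'.length : Int) + 1 + (t :: ts').length := by
      simp
    rw [PySem.List.pyRange_one_cons hlt]
    simp only [List.foldl_cons]
    -- evaluate the body at i = front'.length + 1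
    have hseq1 : PySem.List.pyGetD ((front' ++ [prev]) ++ t :: ts') ((front'.length : Int) + 1) "" = t := by
      have : ((front'.length : Int) + 1) = (((front' ++ [prev]).length : Nat) : Int) := by simp
      rw [this, pyGetD_append_length]
    have hseq0 : PySem.List.pyGetD ((front' ++ [prev]) ++ t :: ts') ((front'.length : Int) + 1 - 1) "" = prev := by
      have h1 : (front' ++ [prev]) ++ t :: ts' = front' ++ prev :: (t :: ts') := by simp
      have h2 : ((front'.length : Int) + 1 - 1) = (front'.length : Int) := by ring
      rw [h1, h2, pyGetD_append_length]
    have hdr : ∀ rest : List Int,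
        PySem.List.pyGetD ((done' ++ [r]) ++ rest) ((front'.length : Int) + 1 - 1) 0 = r := by
      intro rest
      have h1 : (done' ++ [r]) ++ rest = done' ++ r :: rest := by simp
      have h2 : ((front'.length : Int) + 1 - 1) = ((done'.length : Nat) : Int) := by
        rw [hlen]; ring
      rw [h1, h2, pyGetD_append_length]
    have hset : ∀ (rest : List Int) (k v : Int),
        PySem.List.pySetD ((done' ++ [r]) ++ k :: rest) ((front'.length : Int) + 1) v
          = (done' ++ [r]) ++ v :: rest := by
      intro rest k v
      have h2 : ((front'.length : Int) + 1) = (((done' ++ [r]).length : Nat) : Int) := by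
        simp [hlen]
      rw [h2, PySem.List.pySetD_natCast, set_append_length]
    set r' : Int := if t = prev then r else r + 1 with hr'
    have hbody : ∀ rest : List Int,
        stepA ((front' ++ [prev]) ++ t :: ts') ((done' ++ [r]) ++ ((front'.length : Int) + 1) :: rest)
            ((front'.length : Int) + 1)
          = (done' ++ [r]) ++ r' :: rest := by
      intro rest
      unfold stepA
      rw [hseq1, hseq0, hdr, hset, hset, hr']
      by_cases h : t = prev <;> simp [h]
    rw [hbody]
    have hIH := ih (front' ++ [prev]) t (done' ++ [r]) r' (by simp [hlen])
    have hcast : (((front' ++ [prev]).length : Nat) : Int) + 1 = (front'.length : Int) + 1 + 1 := by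
      simp
    simp only [hcast, List.append_assoc, List.cons_append,
      List.nil_append] at hIH ⊢
    have he : (front'.length : Int) + 1 + ((t :: ts').length : Int)
        = (front'.length : Int) + 1 + 1 + (ts'.length : Int) := by
      simp; ring
    rw [he, hIH]
    simp [ranksGo, ← hr']

-- B's accumulator loop produces a prefix-sum scan
theorem foldB (fs : List Int) : ∀ (acc : List Int) (t : Int),
    (fs.foldl (fun (a : List Int × Int) f => (a.1 ++ [a.2 + f], a.2 + f)) (acc, t)).1
      = acc ++ scanT t fs := by
  induction fs with
  | nil => intro acc t; simp [scanT]
  | cons f fs' ih => intro acc t; simp [scanT, ih]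

-- the scan of the change flags is exactly the dense-rank recursion
theorem scan_flags (xs : List String) : ∀ (x : String) (r : Int),
    scanT r (((x :: xs).zip xs).map (fun p => if p.2 ≠ p.1 then 1 else 0)) = ranksGo x r xs := by
  induction xs with
  | nil => intro x r; simp [scanT, ranksGo]
  | cons y ys ih =>
    intro x r
    simp only [List.zip_cons_cons, List.map_cons, scanT, ranksGo, ← ih y]
    by_cases h : y = x <;> simp [h]

theorem alt_eq (x : String) (xs : List String) :
    int_list_alt (x :: xs) = 0 :: ranksGo x 0 xs := by
  simp only [int_list_alt]
  rw [foldB, scan_flags]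
  simp

theorem a_eq (x : String) (xs : List String) :
    int_list (x :: xs) = 0 :: ranksGo x 0 xs := by
  simp only [int_list]
  have hn : ((x :: xs).length : Int) = (0 : Int) + 1 + (xs.length : Int) := by simp; ring
  have h0 : (0 : Int) < ((x :: xs).length : Int) := by simp
  rw [PySem.List.pyRange_one_cons h0]
  have := loopA xs [] x [] 0 rfl
  simp only [List.length_nil, Nat.cast_zero, List.nil_append] at this
  rw [hn] at *
  simpa using this

-- ===== VERDICT (by name: the statement is the Claim_ definition above) =====
theorem int_list_spec : Claim_equal_int_list := by
  intro sequence _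
  unfold Spec_int_list
  cases sequence with
  | nil => rfl
  | cons x xs => rw [a_eq, alt_eq]
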